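-- pv_equiv track=rewrite | github.com/gits79/algorithm | 백준/Silver/1652. 누울 자리를 찾아라/누울 자리를 찾아라.py | count_places
-- ===== SOURCE A (Python) =====
-- def count_places(array, n):
--     count = 0
--     for line in array:
--         empty_space = 0
--         for char in line:
--             if char == '.':
--                 empty_space += 1
--             else:
--                 if empty_space >= 2:
--                     count += 1
--                 empty_space = 0
--         if empty_space >= 2:
--             count += 1
--     return count
-- ===== SOURCE B (Python) =====
-- def count_places(array, n):
--     # Stateless sliding-window: pad each line with a space on both sides and
--     # count the 3-char windows "X.." with X not a dot -- i.e. the left boundary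
--     # of every maximal dot-run of length >= 2 -- via zip of shifted copies.
--     # No running counter and no end-of-line flush are needed.
--     total = 0
--     for line in array:
--         pad = ' ' + line + ' '
--         total += sum(a != '.' and b == '.' and c == '.'
--                      for a, b, c in zip(pad, pad[1:], pad[2:]))
--     return total
-- ===== Notes on version B (the rewrite author's own statement) =====
-- stated objective: alternative
-- what changed: Replaces A's per-character running-counter state machine (counter plus end-of-line flush) with a stateless 3-wide sliding-window match over zips of shifted copies of the space-padded line, counting each qualifying run exactly once at its left boundary.
import Mathlib
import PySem

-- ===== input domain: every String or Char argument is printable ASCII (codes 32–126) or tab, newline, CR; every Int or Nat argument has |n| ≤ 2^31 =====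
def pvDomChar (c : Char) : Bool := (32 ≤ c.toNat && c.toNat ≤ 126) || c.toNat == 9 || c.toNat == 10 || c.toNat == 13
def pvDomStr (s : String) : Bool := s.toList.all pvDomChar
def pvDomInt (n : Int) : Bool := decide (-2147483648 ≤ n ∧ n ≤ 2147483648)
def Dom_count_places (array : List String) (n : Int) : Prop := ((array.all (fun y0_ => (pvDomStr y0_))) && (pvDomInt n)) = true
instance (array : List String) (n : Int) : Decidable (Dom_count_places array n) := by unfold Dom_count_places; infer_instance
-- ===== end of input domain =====

-- B replaces A's running-counter state machine by a stateless 3-wide sliding window over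
-- zips of shifted copies of the space-padded line (objective: alternative, same cost).


-- ===== PORT A =====
-- inner-loop body: state (empty_space, count)
def cpStepA (st : Int × Int) (ch : Char) : Int × Int :=
  if ch = '.' then (st.1 + 1, st.2)
  else (0, if st.1 ≥ 2 then st.2 + 1 else st.2)

-- the trailing `if empty_space >= 2: count += 1` after the inner loop
def cpFinishA (st : Int × Int) : Int :=
  if st.1 ≥ 2 then st.2 + 1 else st.2

def count_places (array : List String) (n : Int) : Int :=
  array.foldl (fun count line => cpFinishA (line.toList.foldl cpStepA (0, count))) 0

-- ===== PORT B =====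
-- B's per-line sum: pad = ' ' + line + ' ', then sum over zip(pad, pad[1:], pad[2:])
def count_places_alt (array : List String) (n : Int) : Int :=
  array.foldl
    (fun total line =>
      let pad := ' ' :: (line.toList ++ [' '])
      total +
        ((pad.zip (pad.drop 1)).zip (pad.drop 2)).foldl
          (fun t x => t + (if x.1.1 ≠ '.' ∧ x.1.2 = '.' ∧ x.2 = '.' then 1 else 0)) 0)
    0

-- ===== PRECONDITION & SPEC =====
def Spec_count_places (array : List String) (n : Int) (out : Int) : Prop := out = count_places_alt array n
instance (array : List String) (n : Int) (out : Int) : Decidable (Spec_count_places array n out) := by unfold Spec_count_places; infer_instance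

-- ===== CLAIM (what is proved, stated in full; the proofs are below) =====
def Claim_equal_count_places : Prop := ∀ (array : List String) (n : Int), Dom_count_places array n → Spec_count_places array n (count_places array n)

-- ===== LEMMAS AND PROOFS =====

-- recursive form of the sliding-window count: cpT prev xs counts windows "X.." in prev::xs
def cpT : Char → List Char → Int
  | _, [] => 0
  | _, [_] => 0
  | prev, b :: c :: rest =>
      (if prev ≠ '.' ∧ b = '.' ∧ c = '.' then 1 else 0) + cpT b (c :: rest)

lemma cpT_congr (xs : List Char) (p q : Char) (hp : p ≠ '.') (hq : q ≠ '.') :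
    cpT p xs = cpT q xs := by
  match xs with
  | [] => rfl
  | [_] => rfl
  | b :: c :: rest => simp [cpT, hp, hq]

-- the fold over the zipped triples of p::xs equals cpT p xs (shifted by the accumulator)
lemma cpZip (xs : List Char) : ∀ (p : Char) (t : Int),
    (((p :: xs).zip xs).zip (xs.drop 1)).foldl
      (fun t x => t + (if x.1.1 ≠ '.' ∧ x.1.2 = '.' ∧ x.2 = '.' then 1 else 0)) t
      = t + cpT p xs := by
  induction xs with
  | nil => intro p t; simp [cpT]
  | cons b rest ih =>
    intro p t
    match rest with
    | [] => simp [cpT]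
    | c :: rest' =>
      have := ih b (t + (if p ≠ '.' ∧ b = '.' ∧ c = '.' then 1 else 0))
      simp only [List.zip_cons_cons, List.drop_succ_cons, List.drop_zero,
        List.foldl_cons, cpT] at *
      omega

-- cpT skips a leading non-dot character (the window at it cannot match)
lemma cpT_cons_nondot (p b : Char) (xs : List Char) (hb : b ≠ '.') (hxs : xs ≠ []) :
    cpT p (b :: xs) = cpT b xs := by
  match xs with
  | c :: rest => simp [cpT, hb]

-- main invariant: A's inner loop from state (es, count) vs the window count of the rest
lemma cpInv (cs : List Char) : ∀ (es : Nat) (count : Int),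
    cpFinishA (cs.foldl cpStepA ((es : Nat), count))
      = count + (if 2 ≤ es ∨ (es = 1 ∧ cs.head? = some '.') then 1 else 0)
        + cpT (if 1 ≤ es then '.' else ' ') (cs ++ [' ']) := by
  induction cs with
  | nil =>
    intro es count
    simp only [List.foldl_nil, cpFinishA, List.nil_append, cpT, List.head?]
    simp only [ge_iff_le, show ((2:Int) ≤ (es:Nat)) ↔ 2 ≤ es by exact_mod_cast Iff.rfl]
    split <;> split <;> simp_all <;> omega
  | cons b rest ih =>
    intro es count
    by_cases hb : b = '.'
    · subst hb
      have h1 : cpStepA ((es : Nat), count) '.' = (((es + 1 : Nat) : Int), count) := by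
        simp [cpStepA]
      rw [List.foldl_cons, h1, ih (es + 1) count]
      match rest with
      | [] =>
        simp only [List.nil_append, List.cons_append, cpT, List.head?]
        by_cases h : 1 ≤ es
        · simp only [if_pos h]
          split_ifs <;> first | (simp_all; done) | (simp_all; omega) | omega
        · have hes : es = 0 := by omega
          subst hes
          norm_num [cpT]
          simp
      | c :: rest' =>
        simp only [List.cons_append, cpT, List.head?]
        by_cases h : 1 ≤ es
        · simp only [if_pos h, if_pos (by omega : 1 ≤ es + 1)]
          by_cases h2 : c = '.' <;> split_ifs <;> simp_all <;> omega
        · have hes : es = 0 := by omega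
          subst hes
          simp only [if_pos (by omega : 1 ≤ 0 + 1), if_neg (by omega : ¬ (1:Nat) ≤ 0)]
          by_cases h2 : c = '.' <;> split_ifs <;> simp_all <;> omega
    · have h1 : cpStepA ((es : Nat), count) b
          = (((0 : Nat) : Int), if ((es : Nat) : Int) ≥ 2 then count + 1 else count) := by
        simp [cpStepA, hb]
      rw [List.foldl_cons, h1, ih 0 _]
      have hne : rest ++ [' '] ≠ [] := by simp
      rw [show (b :: rest) ++ [' '] = b :: (rest ++ [' ']) from rfl,
        cpT_cons_nondot _ b _ hb hne,
        cpT_congr (rest ++ [' ']) b ' ' hb (by decide)]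
      have hcast : (((es : Nat) : Int) ≥ 2) ↔ 2 ≤ es := by exact_mod_cast Iff.rfl
      simp only [List.head?]
      have hhb : ¬ (some b = some '.') := by simp [hb]
      split_ifs <;> simp_all <;> omega

-- per-line agreement
lemma cpLine (line : String) (count : Int) :
    cpFinishA (line.toList.foldl cpStepA (0, count))
      = count + cpT ' ' (line.toList ++ [' ']) := by
  have := cpInv line.toList 0 count
  simpa using this

-- B's outer fold shifts its accumulator additively
lemma cpAlt_shift (lines : List String) : ∀ (x : Int),
    lines.foldl
      (fun total line =>
        let pad := ' ' :: (line.toList ++ [' '])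
        total +
          ((pad.zip (pad.drop 1)).zip (pad.drop 2)).foldl
            (fun t x => t + (if x.1.1 ≠ '.' ∧ x.1.2 = '.' ∧ x.2 = '.' then 1 else 0)) 0) x
      = x + lines.foldl
        (fun total line =>
          let pad := ' ' :: (line.toList ++ [' '])
          total +
            ((pad.zip (pad.drop 1)).zip (pad.drop 2)).foldl
              (fun t x => t + (if x.1.1 ≠ '.' ∧ x.1.2 = '.' ∧ x.2 = '.' then 1 else 0)) 0) 0 := by
  induction lines with
  | nil => intro x; simp
  | cons l rest ih =>
    intro x
    rw [List.foldl_cons, List.foldl_cons, ih, ih (0 + _)]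
    ring

-- outer loops agree
lemma cpOuter (lines : List String) : ∀ (count : Int),
    lines.foldl (fun count line => cpFinishA (line.toList.foldl cpStepA (0, count))) count
      = count + lines.foldl
        (fun total line =>
          let pad := ' ' :: (line.toList ++ [' '])
          total +
            ((pad.zip (pad.drop 1)).zip (pad.drop 2)).foldl
              (fun t x => t + (if x.1.1 ≠ '.' ∧ x.1.2 = '.' ∧ x.2 = '.' then 1 else 0)) 0) 0 := by
  induction lines with
  | nil => intro count; simp
  | cons l rest ih =>
    intro count
    rw [List.foldl_cons, List.foldl_cons, ih, cpAlt_shift rest (0 + _)]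
    have hz : (((' ' :: (l.toList ++ [' '])).zip ((' ' :: (l.toList ++ [' '])).drop 1)).zip
        ((' ' :: (l.toList ++ [' '])).drop 2)).foldl
          (fun t x => t + (if x.1.1 ≠ '.' ∧ x.1.2 = '.' ∧ x.2 = '.' then 1 else 0)) 0
        = cpT ' ' (l.toList ++ [' ']) := by
      have := cpZip (l.toList ++ [' ']) ' ' 0
      simpa using this
    rw [cpLine l count]
    simp only [hz]
    ring

-- ===== VERDICT (by name: the statement is the Claim_ definition above) =====
theorem count_places_spec : Claim_equal_count_places := by
  intro array n _
  unfold Spec_count_places count_places count_places_alt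
  simpa using cpOuter array 0
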